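-- pv_equiv track=rewrite | github.com/RomainGuimbal/SurfacePsycho | common/utils.py | dict_to_list_missing_index_filled
-- ===== SOURCE A (Python) =====
-- def dict_to_list_missing_index_filled(dict: dict) -> list:
--     min_index = min(dict.keys())
--     max_index = max(dict.keys())
--     list_attr = []
--     for i in range(min_index, max_index + 1):
--         if i in dict:
--             list_attr.append(dict[i])
--         else:
--             list_attr.append([])
--     return list_attr
-- ===== SOURCE B (Python) =====
-- def dict_to_list_missing_index_filled(dict: dict) -> list:
--     lo = min(dict.keys())
--     hi = max(dict.keys())
--     result = [[] for _ in range(hi - lo + 1)]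
--     for k, v in dict.items():
--         result[k - lo] = v
--     return result
-- ===== Notes on version B (the rewrite author's own statement) =====
-- stated objective: alternative
-- what changed: Instead of scanning the whole index range and testing membership per slot, B pre-allocates a list of empty slots and scatters each dict item into its position by index arithmetic.
import Mathlib
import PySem

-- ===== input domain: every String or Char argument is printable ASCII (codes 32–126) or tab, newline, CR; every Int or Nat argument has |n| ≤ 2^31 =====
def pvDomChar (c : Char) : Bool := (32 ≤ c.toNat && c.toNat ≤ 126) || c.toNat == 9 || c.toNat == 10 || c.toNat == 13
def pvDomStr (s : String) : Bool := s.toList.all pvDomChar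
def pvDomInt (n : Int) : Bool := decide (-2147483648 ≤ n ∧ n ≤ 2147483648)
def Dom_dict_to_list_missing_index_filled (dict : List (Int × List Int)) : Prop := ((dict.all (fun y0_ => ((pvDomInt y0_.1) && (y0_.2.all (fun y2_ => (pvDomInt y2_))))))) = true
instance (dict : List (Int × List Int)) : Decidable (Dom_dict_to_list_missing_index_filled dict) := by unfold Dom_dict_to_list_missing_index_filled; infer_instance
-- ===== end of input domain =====

-- B scatters each dict item into a pre-allocated list of empty slots instead of
-- scanning the whole index range and testing membership per slot (alternative decomposition).
-- Return value only; neither program mutates its argument.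

-- ===== PORT A =====
-- A: min/max over the keys, then scan range(min, max+1) appending dict[i] or [].
def dict_to_list_missing_index_filled (dict : List (Int × List Int)) : List (List Int) :=
  match PySem.List.min? (dict.map Prod.fst) (fun x => x),
        PySem.List.max? (dict.map Prod.fst) (fun x => x) with
  | some lo, some hi =>
      (PySem.List.pyRange lo (hi + 1) 1).foldl
        (fun acc i =>
          if (PySem.Dict.mk dict).contains i then
            acc ++ [(PySem.Dict.mk dict).getD i []]
          else
            acc ++ [[]]) []
  | _, _ => []  -- unreachable inside Pre_: Python's min() raises ValueError on the empty dict

-- ===== PORT B =====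
-- B: pre-allocate (hi-lo+1) empty slots, then scatter each item to result[k-lo].
-- pySetD is exact here: inside Pre_ every index k-lo is provably in [0, hi-lo+1).
def dict_to_list_missing_index_filled_alt (dict : List (Int × List Int)) : List (List Int) :=
  match PySem.List.min? (dict.map Prod.fst) (fun x => x) with
  | none => []  -- unreachable inside Pre_: min() raises ValueError on the empty dict
  | some lo =>
    match PySem.List.max? (dict.map Prod.fst) (fun x => x) with
    | none => []  -- unreachable inside Pre_
    | some hi =>
        dict.foldl (fun res kv => PySem.List.pySetD res (kv.1 - lo) kv.2)
          ((PySem.List.pyRange 0 (hi - lo + 1) 1).map (fun _ => ([] : List Int)))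

-- ===== PRECONDITION & SPEC =====
-- Pre_ excludes the empty dict, on which A raises ValueError (min of an empty sequence),
-- and association lists with duplicate keys, which do not encode any Python dict
-- (a Python dict cannot hold two entries with the same key).
def Pre_dict_to_list_missing_index_filled (dict : List (Int × List Int)) : Prop :=
  dict ≠ [] ∧ (dict.map Prod.fst).Nodup
instance (dict : List (Int × List Int)) : Decidable (Pre_dict_to_list_missing_index_filled dict) := by unfold Pre_dict_to_list_missing_index_filled; infer_instance
def pvWitness_dict_to_list_missing_index_filled : (List (Int × List Int)) := [(1, [7]), (3, [8, 9])]
def Spec_dict_to_list_missing_index_filled (dict : List (Int × List Int)) (out : List (List Int)) : Prop := out = dict_to_list_missing_index_filled_alt dict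
instance (dict : List (Int × List Int)) (out : List (List Int)) : Decidable (Spec_dict_to_list_missing_index_filled dict out) := by unfold Spec_dict_to_list_missing_index_filled; infer_instance

-- ===== CLAIM (what is proved, stated in full; the proofs are below) =====
def Claim_equal_dict_to_list_missing_index_filled : Prop := ∀ (dict : List (Int × List Int)), Dom_dict_to_list_missing_index_filled dict → Pre_dict_to_list_missing_index_filled dict → Spec_dict_to_list_missing_index_filled dict (dict_to_list_missing_index_filled dict)

-- ===== LEMMAS AND PROOFS =====

-- The scatter loop of B, element by element: after folding the items of l into res,
-- position j holds the (unique) value of key lo+j if l has it, and res[j] otherwise.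
theorem scatter_getElem? (lo : Int) (l : List (Int × List Int)) (res : List (List Int))
    (hk : ∀ kv ∈ l, lo ≤ kv.1 ∧ (kv.1 - lo).toNat < res.length)
    (hnd : (l.map Prod.fst).Nodup) (j : Nat) :
    (l.foldl (fun r kv => PySem.List.pySetD r (kv.1 - lo) kv.2) res)[j]? =
      if (lo + (j : Int)) ∈ l.map Prod.fst then
        some ((PySem.Dict.mk l).getD (lo + (j : Int)) [])
      else res[j]? := by
  induction l generalizing res with
  | nil => simp
  | cons kv rest ih =>
    obtain ⟨k1, v1⟩ := kv
    obtain ⟨hlo, hlt⟩ := hk (k1, v1) (List.mem_cons_self ..)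
    have hkrest : ∀ p ∈ rest, lo ≤ p.1 ∧ (p.1 - lo).toNat < (PySem.List.pySetD res (k1 - lo) v1).length := by
      intro p hp
      rw [PySem.List.length_pySetD]
      exact hk p (List.mem_cons_of_mem _ hp)
    have hnd' : k1 ∉ rest.map Prod.fst ∧ (rest.map Prod.fst).Nodup := by
      simpa using hnd
    rw [List.foldl_cons, ih _ hkrest hnd'.2]
    have hset : PySem.List.pySetD res (k1 - lo) v1 = res.set (k1 - lo).toNat v1 :=
      PySem.List.pySetD_of_nonneg res v1 (by omega)
    by_cases hmem : (lo + (j : Int)) ∈ rest.map Prod.fst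
    · have hne : k1 ≠ lo + (j : Int) := fun h => hnd'.1 (h ▸ hmem)
      have hcons : (lo + (j : Int)) ∈ ((k1, v1) :: rest).map Prod.fst := by
        rw [List.map_cons]; exact List.mem_cons_of_mem _ hmem
      rw [if_pos hmem, if_pos hcons]
      simp [PySem.Dict.getD, PySem.Dict.get?_mk_cons, hne]
    · by_cases heq : k1 = lo + (j : Int)
      · have hj : (k1 - lo).toNat = j := by omega
        have hcons : (lo + (j : Int)) ∈ ((k1, v1) :: rest).map Prod.fst := by
          rw [List.map_cons]; exact heq ▸ List.mem_cons_self ..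
        rw [if_neg hmem, if_pos hcons, hset, hj]
        have hjr : j < res.length := by omega
        have hr : (res.set j v1)[j]? = some v1 := by
          rw [List.getElem?_eq_getElem (by simpa using hjr : j < (res.set j v1).length)]
          simp
        rw [hr]
        simp [PySem.Dict.getD, PySem.Dict.get?_mk_cons, heq]
      · have hncons : (lo + (j : Int)) ∉ ((k1, v1) :: rest).map Prod.fst := by
          rw [List.map_cons]
          intro h
          rcases List.mem_cons.mp h with h | h
          · exact heq h.symm
          · exact hmem h
        rw [if_neg hmem, if_neg hncons, hset, List.getElem?_set_ne (by omega)]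

-- A's range-scan body is an append of a single element.
theorem scan_eq_map (d : PySem.Dict Int (List Int)) (lo hi : Int) :
    (PySem.List.pyRange lo (hi + 1) 1).foldl
      (fun acc i => if d.contains i then acc ++ [d.getD i []] else acc ++ [[]]) [] =
    (PySem.List.pyRange lo (hi + 1) 1).map (fun i => if d.contains i then d.getD i [] else []) := by
  have hf : (fun (acc : List (List Int)) (i : Int) =>
      if d.contains i then acc ++ [d.getD i []] else acc ++ [[]]) =
      fun acc i => acc ++ [if d.contains i then d.getD i [] else []] := by
    funext acc i; split <;> rfl
  rw [hf, PySem.List.foldl_append_singleton_eq_map]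
  simp

-- contains on a literal Dict is membership of the key list.
theorem contains_mk_iff (l : List (Int × List Int)) (x : Int) :
    (PySem.Dict.mk l).contains x = true ↔ x ∈ l.map Prod.fst := by
  rw [PySem.Dict.contains_iff_mem_keys]
  simp [PySem.Dict.keys]

-- ===== VERDICT (by name: the statement is the Claim_ definition above) =====
theorem dict_to_list_missing_index_filled_spec : Claim_equal_dict_to_list_missing_index_filled := by
  intro dict _ hpre
  obtain ⟨hne, hnd⟩ := hpre
  unfold Spec_dict_to_list_missing_index_filled
  unfold dict_to_list_missing_index_filled dict_to_list_missing_index_filled_alt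
  have hkeys : dict.map Prod.fst ≠ [] := by simpa using hne
  obtain ⟨lo, hlo⟩ : ∃ lo, PySem.List.min? (dict.map Prod.fst) (fun x => x) = some lo := by
    cases h : PySem.List.min? (dict.map Prod.fst) (fun x => x) with
    | none => exact absurd ((PySem.List.min?_eq_none_iff _ _).mp h) hkeys
    | some m => exact ⟨m, rfl⟩
  obtain ⟨hi, hhi⟩ : ∃ hi, PySem.List.max? (dict.map Prod.fst) (fun x => x) = some hi := by
    cases h : PySem.List.max? (dict.map Prod.fst) (fun x => x) with
    | none => exact absurd ((PySem.List.max?_eq_none_iff _ _).mp h) hkeys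
    | some m => exact ⟨m, rfl⟩
  rw [hlo, hhi]
  dsimp only
  have hmin := PySem.List.min?_isMin hlo
  have hmax := PySem.List.max?_isMax hhi
  have hlohi : lo ≤ hi := by
    obtain ⟨k, hk⟩ := List.exists_mem_of_ne_nil _ hkeys
    exact le_trans (hmin k hk) (hmax k hk)
  -- compare element by element
  apply List.ext_getElem?
  intro j
  set n : Nat := (hi + 1 - lo).toNat with hn
  have hinit_len : ((PySem.List.pyRange 0 (hi - lo + 1) 1).map (fun _ => ([] : List Int))).length = n := by
    rw [List.length_map, PySem.List.length_pyRange_one]; omega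
  have hkv : ∀ kv ∈ dict, lo ≤ kv.1 ∧ (kv.1 - lo).toNat <
      ((PySem.List.pyRange 0 (hi - lo + 1) 1).map (fun _ => ([] : List Int))).length := by
    intro kv hkv
    have h1 := hmin kv.1 (List.mem_map_of_mem hkv)
    have h2 := hmax kv.1 (List.mem_map_of_mem hkv)
    rw [hinit_len]
    constructor
    · exact h1
    · omega
  rw [scan_eq_map, scatter_getElem? lo dict _ hkv hnd j]
  rw [List.getElem?_map, PySem.List.getElem?_pyRange_one]
  by_cases hj : j < n
  · rw [if_pos (by omega : j < (hi + 1 - lo).toNat)]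
    by_cases hmem : (lo + (j : Int)) ∈ dict.map Prod.fst
    · rw [if_pos hmem]
      simp only [Option.map_some]
      rw [if_pos ((contains_mk_iff dict _).mpr hmem)]
    · rw [if_neg hmem, List.getElem?_map, PySem.List.getElem?_pyRange_one,
        if_pos (by omega : j < (hi - lo + 1 - 0).toNat)]
      simp only [Option.map_some]
      have : ¬ ((PySem.Dict.mk dict).contains (lo + (j : Int)) = true) := fun h =>
        hmem ((contains_mk_iff dict _).mp h)
      rw [if_neg this]
  · rw [if_neg (by omega : ¬ j < (hi + 1 - lo).toNat)]
    have hmem : ¬ (lo + (j : Int)) ∈ dict.map Prod.fst := by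
      intro hm
      have : lo + (j : Int) ≤ hi := by simpa using hmax _ hm
      omega
    rw [if_neg hmem, List.getElem?_map, PySem.List.getElem?_pyRange_one,
      if_neg (by omega : ¬ j < (hi - lo + 1 - 0).toNat)]
    rfl
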